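-- pv_equiv track=rewrite | github.com/berndtssonMichael/AdventOfCode | 2022/01.py | group_meals
-- ===== SOURCE A (Python) =====
-- def group_meals(values):
--     calories = []
--     s = 0
--     for v in values:
--         if v.isdigit():
--             s += int(v)
--         else:
--             calories.append(s)
--             s = 0
--     # add last item
--     calories.append(s)
--
--     return calories
-- ===== SOURCE B (Python) =====
-- def group_meals(values):
--     # Run-based: repeatedly measure the maximal run of digit entries starting
--     # at i, emit its sum as one group, skip the separator, and continue.
--     out = []
--     i, n = 0, len(values)
--     while True:
--         j = i
--         while j < n and values[j].isdigit():
--             j += 1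
--         out.append(sum(int(values[t]) for t in range(i, j)))
--         if j == n:
--             return out
--         i = j + 1
-- ===== Notes on version B (the rewrite author's own statement) =====
-- stated objective: alternative
-- what changed: Replaces A's element-at-a-time fold with a running sum by a run-based consumer: find the maximal run of digit entries, emit its sum as one group, skip the separator, and repeat on the remainder (ported as suffix recursion with takeWhile/dropWhile).
import Mathlib
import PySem

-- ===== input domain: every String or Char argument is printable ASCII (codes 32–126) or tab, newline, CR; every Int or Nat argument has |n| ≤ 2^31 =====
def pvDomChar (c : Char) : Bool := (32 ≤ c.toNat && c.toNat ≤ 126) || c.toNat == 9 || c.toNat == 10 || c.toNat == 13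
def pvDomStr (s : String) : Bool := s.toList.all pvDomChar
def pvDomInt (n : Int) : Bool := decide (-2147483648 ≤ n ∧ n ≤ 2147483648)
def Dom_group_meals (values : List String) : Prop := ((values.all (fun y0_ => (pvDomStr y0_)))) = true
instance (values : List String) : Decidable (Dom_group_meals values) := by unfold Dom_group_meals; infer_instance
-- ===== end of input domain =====

-- B consumes the input run by run (sum of each maximal digit prefix, skip the separator, recurse) instead of A's element-wise fold; return values proved equal.

-- ===== PORT A =====
def group_meals (values : List String) : List Int :=
  let st := values.foldl (fun (p : List Int × Int) v =>
    if PySem.Str.strIsdigit v then (p.1, p.2 + (PySem.Int.ofStr? v).getD 0)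
    else (p.1 ++ [p.2], 0)) ([], 0)
  st.1 ++ [st.2]

-- ===== PORT B =====
def group_meals_alt (values : List String) : List Int :=
  -- inner while: length of the maximal leading digit run = takeWhile;
  -- rest[:k] is that prefix, rest[k+1:] is the tail past the separator.
  let pre := values.takeWhile PySem.Str.strIsdigit
  let head := (pre.map (fun x => (PySem.Int.ofStr? x).getD 0)).sum
  match h : values.dropWhile PySem.Str.strIsdigit with
  | [] => [head]
  | _ :: rest => head :: group_meals_alt rest
termination_by values.length
decreasing_by
  have h1 : (values.dropWhile PySem.Str.strIsdigit).length ≤ values.length :=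
    List.length_dropWhile_le _ _
  rw [h] at h1; simp at h1; omega

-- ===== PRECONDITION & SPEC =====
def Spec_group_meals (values : List String) (out : List Int) : Prop := out = group_meals_alt values
instance (values : List String) (out : List Int) : Decidable (Spec_group_meals values out) := by unfold Spec_group_meals; infer_instance

-- ===== CLAIM (what is proved, stated in full; the proofs are below) =====
def Claim_equal_group_meals : Prop := ∀ (values : List String), Dom_group_meals values → Spec_group_meals values (group_meals values)

-- ===== LEMMAS AND PROOFS =====

-- add s to the first group (creating it if absent)
def pvAddFirst (s : Int) : List Int → List Int
  | [] => [s]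
  | h :: t => (s + h) :: t

theorem pvAddFirst_add (s t : Int) (l : List Int) :
    pvAddFirst s (pvAddFirst t l) = pvAddFirst (s + t) l := by
  cases l <;> simp [pvAddFirst, add_assoc]

theorem group_meals_alt_ne_nil (values : List String) : group_meals_alt values ≠ [] := by
  unfold group_meals_alt
  split <;> simp

theorem group_meals_alt_cons_digit (v : String) (rest : List String)
    (h : PySem.Str.strIsdigit v = true) :
    group_meals_alt (v :: rest) = pvAddFirst ((PySem.Int.ofStr? v).getD 0) (group_meals_alt rest) := by
  rw [group_meals_alt, group_meals_alt]
  simp only [List.takeWhile_cons, h, if_true, List.map_cons, List.sum_cons]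
  have hd : List.dropWhile PySem.Str.strIsdigit (v :: rest)
      = List.dropWhile PySem.Str.strIsdigit rest := by
    have h' : PySem.Chars.strIsdigit v.toList = true := h
    simp [h']
  split <;> rename_i heq <;> rw [hd] at heq
  · split <;> rename_i heq2
    · simp [pvAddFirst]
    · rw [heq] at heq2; cases heq2
  · split <;> rename_i heq2
    · rw [heq] at heq2; cases heq2
    · rw [heq] at heq2
      injection heq2 with e1 e2
      rw [e2]
      simp [pvAddFirst]

theorem group_meals_alt_cons_sep (v : String) (rest : List String)
    (h : PySem.Str.strIsdigit v = false) :
    group_meals_alt (v :: rest) = 0 :: group_meals_alt rest := by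
  rw [group_meals_alt]
  simp only [List.takeWhile_cons, h, Bool.false_eq_true, if_false, List.map_nil, List.sum_nil]
  have hd : List.dropWhile PySem.Str.strIsdigit (v :: rest) = v :: rest := by
    have h' : PySem.Chars.strIsdigit v.toList = false := h
    simp [h']
  split <;> rename_i heq <;> rw [hd] at heq
  · cases heq
  · injection heq with e1 e2
    rw [e2]

theorem pv_fold_inv (values : List String) (acc : List Int) (s : Int) :
    (let st := values.foldl (fun (p : List Int × Int) v =>
        if PySem.Str.strIsdigit v then (p.1, p.2 + (PySem.Int.ofStr? v).getD 0)
        else (p.1 ++ [p.2], 0)) (acc, s)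
     st.1 ++ [st.2]) = acc ++ pvAddFirst s (group_meals_alt values) := by
  induction values generalizing acc s with
  | nil =>
    simp [group_meals_alt, pvAddFirst]
  | cons v rest ih =>
    cases h : PySem.Str.strIsdigit v with
    | true =>
      simp only [List.foldl_cons, h, reduceIte]
      rw [ih, group_meals_alt_cons_digit v rest h, pvAddFirst_add]
    | false =>
      simp only [List.foldl_cons, h, Bool.false_eq_true, reduceIte]
      rw [ih, group_meals_alt_cons_sep v rest h]
      cases hr : group_meals_alt rest with
      | nil => exact absurd hr (group_meals_alt_ne_nil rest)
      | cons a t => simp [pvAddFirst]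

-- ===== VERDICT (by name: the statement is the Claim_ definition above) =====
theorem group_meals_spec : Claim_equal_group_meals := by
  intro values _
  unfold Spec_group_meals group_meals
  rw [pv_fold_inv values [] 0]
  cases hr : group_meals_alt values with
  | nil => exact absurd hr (group_meals_alt_ne_nil values)
  | cons a t => simp [pvAddFirst]
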